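-- pv_equiv track=rewrite | github.com/chloe-codes1/algorithm | Programmers/hash/전화번호_목록.py | solution
-- ===== SOURCE A (Python) =====
-- def solution(phone_book):
--     answer = True
--     count = len(phone_book)
--     for idx, val in enumerate(phone_book):
--         length = len(val)
--         for i in range(count):
--             if idx != i:
--                 if val == phone_book[i][:length]:
--                     answer = False
--                     return answer
--     return answer
-- ===== SOURCE B (Python) =====
-- def solution(phone_book):
--     book = sorted(phone_book)
--     for a, b in zip(book, book[1:]):
--         if b.startswith(a):
--             return False
--     return True
-- ===== Notes on version B (the rewrite author's own statement) =====
-- stated objective: alternative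
-- what changed: Replaced A's all-pairs nested scan (each string compared against every other's prefix slice) by sort-then-adjacent-check: after lexicographic sorting, any prefix pair shows up as an adjacent pair, so one linear scan over the sorted list suffices.
import Mathlib
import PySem

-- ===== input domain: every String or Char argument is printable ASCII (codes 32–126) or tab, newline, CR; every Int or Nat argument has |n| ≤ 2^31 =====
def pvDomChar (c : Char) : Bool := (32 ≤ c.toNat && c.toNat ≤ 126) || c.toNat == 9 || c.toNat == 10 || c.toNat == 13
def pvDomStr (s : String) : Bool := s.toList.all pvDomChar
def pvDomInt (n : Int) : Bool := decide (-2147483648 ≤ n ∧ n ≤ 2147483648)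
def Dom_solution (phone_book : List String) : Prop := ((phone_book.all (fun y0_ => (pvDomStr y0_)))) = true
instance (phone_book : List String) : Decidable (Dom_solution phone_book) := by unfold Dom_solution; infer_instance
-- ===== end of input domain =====

-- B replaces A's all-pairs prefix scan by sort-then-adjacent-check (objective: alternative algorithm).

-- ===== PORT A =====
def solution (phone_book : List String) : Bool :=
  -- answer = True; count = len(phone_book); nested for-loops with early 'return False'
  let count : Int := (phone_book.length : Int)
  if (PySem.List.enumerate phone_book 0).any (fun iv =>
       let length : Int := PySem.Str.len iv.2
       (PySem.List.pyRange 0 count 1).any (fun i =>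
         iv.1 != i && (iv.2 == PySem.Str.slice (PySem.List.pyGetD phone_book i "") none (some length))))
  then false else true

-- ===== PORT B =====
def solution_alt (phone_book : List String) : Bool :=
  let book := PySem.List.sorted phone_book (fun x => x) false
  !((book.zip book.tail).any (fun ab => PySem.Str.startswith ab.2 ab.1))

-- ===== PRECONDITION & SPEC =====
def Spec_solution (phone_book : List String) (out : Bool) : Prop := out = solution_alt phone_book
instance (phone_book : List String) (out : Bool) : Decidable (Spec_solution phone_book out) := by unfold Spec_solution; infer_instance

-- ===== CLAIM (what is proved, stated in full; the proofs are below) =====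
def Claim_equal_solution : Prop := ∀ (phone_book : List String), Dom_solution phone_book → Spec_solution phone_book (solution phone_book)

-- ===== LEMMAS AND PROOFS =====

-- "some list element is a strict-position prefix of another" (what A detects)
def PfxPair (xs : List String) : Prop :=
  ∃ (i j : Nat) (hi : i < xs.length) (hj : j < xs.length),
    i ≠ j ∧ xs[i].toList <+: xs[j].toList

-- lexicographic order on List Char (what String order unfolds to)
theorem lex_cons_iff (c d : Char) (s t : List Char) :
    List.Lex (· < ·) (c :: s) (d :: t) ↔ c < d ∨ (c = d ∧ List.Lex (· < ·) s t) := by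
  constructor
  · intro h
    cases h with
    | cons h => exact Or.inr ⟨rfl, h⟩
    | rel h => exact Or.inl h
  · rintro (h | ⟨rfl, h⟩)
    · exact List.Lex.rel h
    · exact List.Lex.cons h

theorem prefix_not_lt (s t : List Char) (h : s <+: t) : ¬ List.Lex (· < ·) t s := by
  induction s generalizing t with
  | nil => intro hlt; cases hlt
  | cons c s ih =>
    obtain ⟨r, rfl⟩ := h
    intro hlt
    rcases (lex_cons_iff c c (s ++ r) s).mp hlt with h | ⟨_, h⟩
    · exact lt_irrefl c h
    · exact ih (s ++ r) ⟨r, rfl⟩ h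

-- a string lexicographically between a prefix s and its extension t also extends s
theorem prefix_mid (s u t : List Char) (hp : s <+: t)
    (h1 : ¬ List.Lex (· < ·) u s) (h2 : ¬ List.Lex (· < ·) t u) : s <+: u := by
  induction s generalizing u t with
  | nil => exact List.nil_prefix
  | cons c s ih =>
    obtain ⟨r, rfl⟩ := hp
    cases u with
    | nil => exact absurd List.Lex.nil h1
    | cons d u =>
      by_cases hcd : c = d
      · subst hcd
        refine (List.prefix_cons_inj c).mpr (ih u (s ++ r) ⟨r, rfl⟩ ?_ ?_)
        · intro h; exact h1 (List.Lex.cons h)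
        · intro h; exact h2 (List.Lex.cons h)
      · rcases lt_or_gt_of_ne hcd with h | h
        · exact absurd (List.Lex.rel h) h2
        · exact absurd (List.Lex.rel h) h1

theorem perm_pair_eq (l : List String) (x y : String) (h : l.Perm [x,y]) :
    l = [x,y] ∨ l = [y,x] := by
  have hlen := h.length_eq
  rcases l with _ | ⟨a, _ | ⟨b, _ | ⟨c, t⟩⟩⟩ <;> simp at hlen
  have ha : a = x ∨ a = y := by
    have : a ∈ [x, y] := h.mem_iff.mp (by simp)
    simpa using this
  rcases ha with rfl | rfl
  · left
    have : [b].Perm [y] := (List.perm_cons a).mp h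
    simp [List.perm_singleton.mp this]
  · right
    have h' : [a, b].Perm [a, x] := h.trans (List.Perm.swap ..)
    have : [b].Perm [x] := (List.perm_cons a).mp h'
    simp [List.perm_singleton.mp this]

theorem sublist_pair_of_lt (xs : List String) (i j : Nat) (hij : i < j) (hj : j < xs.length) :
    List.Sublist [xs[i]'(hij.trans hj), xs[j]] xs := by
  have hi : i < xs.length := hij.trans hj
  have hdrop : xs.drop i = xs[i] :: xs.drop (i+1) := List.drop_eq_getElem_cons hi
  have hmem : xs[j] ∈ xs.drop (i+1) := by
    refine List.mem_iff_getElem.mpr ⟨j - (i+1), by simp; omega, ?_⟩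
    rw [List.getElem_drop]
    congr 1
    omega
  have h1 : List.Sublist [xs[i], xs[j]] (xs[i] :: xs.drop (i+1)) :=
    List.cons_sublist_cons.mpr (List.singleton_sublist.mpr hmem)
  exact ((hdrop ▸ h1) : List.Sublist [xs[i], xs[j]] (xs.drop i)).trans (List.drop_sublist i xs)

theorem exists_pair_of_sublist (xs : List String) (x y : String) (h : List.Sublist [x, y] xs) :
    ∃ (i j : Nat) (hj : j < xs.length), ∃ (hij : i < j),
      xs[i]'(hij.trans hj) = x ∧ xs[j] = y := by
  induction xs with
  | nil => cases h
  | cons c xs ih =>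
    cases h with
    | cons _ h' =>
      obtain ⟨i, j, hj, hij, hx, hy⟩ := ih h'
      exact ⟨i+1, j+1, by simpa using Nat.succ_lt_succ hj, Nat.succ_lt_succ hij, by simpa using hx, by simpa using hy⟩
    | cons₂ _ h' =>
      have hy : y ∈ xs := List.singleton_sublist.mp h'
      obtain ⟨j, hj, hyj⟩ := List.mem_iff_getElem.mp hy
      exact ⟨0, j+1, by simpa using Nat.succ_lt_succ hj, Nat.succ_pos j, rfl, by simpa using hyj⟩

theorem pfxPair_iff_subperm (xs : List String) :
    PfxPair xs ↔ ∃ x y, List.Subperm [x, y] xs ∧ x.toList <+: y.toList := by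
  constructor
  · rintro ⟨i, j, hi, hj, hne, hp⟩
    refine ⟨xs[i], xs[j], ?_, hp⟩
    rcases Nat.lt_or_ge i j with hij | hge
    · exact (sublist_pair_of_lt xs i j hij hj).subperm
    · have hji : j < i := by omega
      exact ⟨[xs[j], xs[i]], List.Perm.swap .., sublist_pair_of_lt xs j i hji hi⟩
  · rintro ⟨x, y, ⟨l, hperm, hsub⟩, hp⟩
    rcases perm_pair_eq l x y hperm with rfl | rfl
    · obtain ⟨i, j, hj, hij, hx, hy⟩ := exists_pair_of_sublist xs x y hsub
      exact ⟨i, j, hij.trans hj, hj, by omega, by rw [hx, hy]; exact hp⟩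
    · obtain ⟨i, j, hj, hij, hy, hx⟩ := exists_pair_of_sublist xs y x hsub
      exact ⟨j, i, hj, hij.trans hj, by omega, by rw [hx, hy]; exact hp⟩

theorem pfxPair_perm (xs ys : List String) (h : xs.Perm ys) : PfxPair xs ↔ PfxPair ys := by
  rw [pfxPair_iff_subperm, pfxPair_iff_subperm]
  constructor <;> rintro ⟨x, y, hsp, hp⟩
  · exact ⟨x, y, hsp.trans h.subperm, hp⟩
  · exact ⟨x, y, hsp.trans h.symm.subperm, hp⟩

-- "some adjacent pair of the list is a prefix pair" (what B detects on the sorted list)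
def AdjPfx (xs : List String) : Prop :=
  ∃ (m : Nat) (h : m + 1 < xs.length), (xs[m]'(by omega)).toList <+: xs[m+1].toList

theorem le_toList (u v : String) (h : u ≤ v) : ¬ List.Lex (· < ·) v.toList u.toList := by
  have h' := String.le_iff_toList_le.mp h
  exact not_lt.mpr h'

theorem sorted_adj_of_pfx (xs : List String) (i j : Nat)
    (hj : j < (PySem.List.sorted xs (fun x => x) false).length) (hij : i < j)
    (hp : ((PySem.List.sorted xs (fun x => x) false)[i]'(hij.trans hj)).toList <+:
          ((PySem.List.sorted xs (fun x => x) false)[j]).toList) :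
    AdjPfx (PySem.List.sorted xs (fun x => x) false) := by
  have h1 : i + 1 < (PySem.List.sorted xs (fun x => x) false).length := by omega
  refine ⟨i, h1, ?_⟩
  have hle1 : (PySem.List.sorted xs (fun x => x) false)[i]'(hij.trans hj) ≤
      (PySem.List.sorted xs (fun x => x) false)[i+1] :=
    PySem.List.sorted_id_getElem_mono xs (by omega) h1
  have hle2 : (PySem.List.sorted xs (fun x => x) false)[i+1] ≤
      (PySem.List.sorted xs (fun x => x) false)[j] :=
    PySem.List.sorted_id_getElem_mono xs (by omega) hj
  exact prefix_mid _ _ _ hp (le_toList _ _ hle1) (le_toList _ _ hle2)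

theorem pfxPair_sorted_iff_adj (xs : List String) :
    PfxPair (PySem.List.sorted xs (fun x => x) false) ↔
    AdjPfx (PySem.List.sorted xs (fun x => x) false) := by
  constructor
  · rintro ⟨i, j, hi, hj, hne, hp⟩
    rcases Nat.lt_or_ge i j with hij | hge
    · exact sorted_adj_of_pfx xs i j hj hij hp
    · have hji : j < i := by omega
      -- sorted[j] ≤ sorted[i] and sorted[i] prefix of sorted[j] force equality
      have hle : (PySem.List.sorted xs (fun x => x) false)[j] ≤
          (PySem.List.sorted xs (fun x => x) false)[i] :=
        PySem.List.sorted_id_getElem_mono xs (by omega) hi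
      have h2 := prefix_not_lt _ _ hp
      have hle2 : ((PySem.List.sorted xs (fun x => x) false)[i]).toList ≤
          ((PySem.List.sorted xs (fun x => x) false)[j]).toList := not_lt.mp h2
      have heq : ((PySem.List.sorted xs (fun x => x) false)[i]).toList =
          ((PySem.List.sorted xs (fun x => x) false)[j]).toList :=
        le_antisymm hle2 (String.le_iff_toList_le.mp hle)
      exact sorted_adj_of_pfx xs j i hi hji (by rw [← heq])
  · rintro ⟨m, h, hp⟩
    exact ⟨m, m+1, by omega, h, by omega, hp⟩

-- the inner comparison of A: val == phone_book[i][:len(val)]  ⟺  val is a prefix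
theorem cond_iff (val t : String) :
    (val == PySem.Str.slice t none (some (PySem.Str.len val))) = true ↔
    val.toList <+: t.toList := by
  rw [beq_iff_eq, List.prefix_iff_eq_take, PySem.Str.len_eq]
  unfold PySem.Str.slice
  simp only [String.length_toList, PySem.Chars.slice_eq_listSlice, PySem.List.slice_to_natCast]
  constructor
  · intro h
    conv_lhs => rw [h]
    simp
  · intro h
    have := congrArg String.ofList h
    simpa using this

-- the outer double loop of A finds a hit iff a prefix pair exists
theorem anyA_iff (xs : List String) :
    ((PySem.List.enumerate xs 0).any fun iv =>
      (PySem.List.pyRange 0 (xs.length : Int) 1).any fun i =>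
        iv.1 != i && (iv.2 == PySem.Str.slice (PySem.List.pyGetD xs i "") none (some (PySem.Str.len iv.2)))) = true
    ↔ PfxPair xs := by
  simp only [List.any_eq_true, PySem.List.mem_enumerate_iff, PySem.List.mem_pyRange_one,
    Bool.and_eq_true, bne_iff_ne, ne_eq]
  constructor
  · rintro ⟨p, ⟨k, hk, rfl⟩, i, ⟨hi0, hilt⟩, hne, hcond⟩
    have hj : i.toNat < xs.length := by omega
    rw [PySem.List.pyGetD_eq_getElem xs "" hi0 (by omega)] at hcond
    exact ⟨k, i.toNat, hk, hj, by simp at hne; omega, cond_iff _ _ |>.mp hcond⟩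
  · rintro ⟨a, b, ha, hb, hne, hp⟩
    refine ⟨(0 + (a : Int), xs[a]), ⟨a, ha, rfl⟩, (b : Int), ⟨by omega, by omega⟩, by simp; omega, ?_⟩
    rw [PySem.List.pyGetD_eq_getElem xs "" (by omega) (by omega)]
    simp only [Int.toNat_natCast]
    exact cond_iff _ _ |>.mpr hp

-- A returns True iff no prefix pair exists
theorem solution_eq_true_iff (xs : List String) : solution xs = true ↔ ¬ PfxPair xs := by
  unfold solution
  simp only []
  split
  · next h => simp [(anyA_iff xs).mp h]
  · next h => simpa using fun hp => h ((anyA_iff xs).mpr hp)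

-- B returns True iff no adjacent prefix pair exists in the sorted list
-- B's adjacent scan finds a hit iff an adjacent prefix pair exists
theorem anyB_iff (book : List String) :
    ((book.zip book.tail).any fun ab => PySem.Str.startswith ab.2 ab.1) = true ↔ AdjPfx book := by
  rw [List.any_eq_true]
  constructor
  · rintro ⟨ab, hmem, hsw⟩
    obtain ⟨m, hm, rfl⟩ := List.mem_iff_getElem.mp hmem
    have hm' : m + 1 < book.length := by
      simp [List.length_zip, List.length_tail] at hm; omega
    refine ⟨m, hm', ?_⟩
    rw [List.getElem_zip] at hsw
    simp only [PySem.Str.startswith_eq] at hsw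
    have := (PySem.Chars.startswith_iff _ _).mp hsw
    simpa [List.getElem_tail] using this
  · rintro ⟨m, hm, hp⟩
    refine ⟨(book[m]'(by omega), book[m+1]), ?_, ?_⟩
    · refine List.mem_iff_getElem.mpr ⟨m, by simp [List.length_zip, List.length_tail]; omega, ?_⟩
      rw [List.getElem_zip]
      simp [List.getElem_tail]
    · simp only [PySem.Str.startswith_eq]
      exact (PySem.Chars.startswith_iff _ _).mpr hp

theorem solution_alt_eq_true_iff (xs : List String) :
    solution_alt xs = true ↔ ¬ AdjPfx (PySem.List.sorted xs (fun x => x) false) := by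
  unfold solution_alt
  rw [Bool.not_eq_true', Bool.eq_false_iff]
  exact not_congr (anyB_iff _)

-- ===== VERDICT (by name: the statement is the Claim_ definition above) =====
theorem solution_spec : Claim_equal_solution := by
  intro xs _
  unfold Spec_solution
  have hA := solution_eq_true_iff xs
  have hB := solution_alt_eq_true_iff xs
  have hmain : PfxPair xs ↔ AdjPfx (PySem.List.sorted xs (fun x => x) false) := by
    rw [← pfxPair_sorted_iff_adj]
    exact pfxPair_perm _ _ (PySem.List.sorted_perm xs (fun x => x) false).symm
  have hiff : (solution xs = true) ↔ (solution_alt xs = true) := by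
    rw [hA, hB, hmain]
  cases hsA : solution xs <;> cases hsB : solution_alt xs <;> simp_all
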